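-- pv_equiv track=rewrite | github.com/ArtificialIntelligentGeneration/lord-event-preview | extract_pages_css.py | parse_blocks
-- ===== SOURCE A (Python) =====
-- def parse_blocks(css):
--     blocks = []
--     i = 0
--     n = len(css)
--     while i < n:
--         while i < n and css[i] in ' \t\n\r':
--             i += 1
--         if i >= n:
--             break
--         if css[i:i+2] == '/*':
--             end = css.find('*/', i + 2)
--             if end == -1:
--                 end = n
--             else:
--                 end += 2
--             blocks.append(css[i:end])
--             i = end
--             continue
--         brace = css.find('{', i)
--         if brace == -1:
--             break
--         depth = 0
--         j = brace
--         while j < n: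
--             if css[j] == '{':
--                 depth += 1
--             elif css[j] == '}':
--                 depth -= 1
--                 if depth == 0:
--                     break
--             j += 1
--         blocks.append(css[i:j+1])
--         i = j + 1
--     return blocks
-- ===== SOURCE B (Python) =====
-- def parse_blocks(css):
--     # Single left-to-right pass with an explicit state machine (idle / comment / rule)
--     # instead of A's nested find()-based scans; same output.
--     blocks = []
--     n = len(css)
--     state = 0   # 0 = idle, 1 = inside comment, 2 = inside rule text
--     start = 0
--     depth = 0
--     i = 0
--     while i < n:
--         c = css[i]
--         if state == 0:
--             if c in ' \t\n\r':
--                 i += 1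
--             elif c == '/' and i + 1 < n and css[i + 1] == '*':
--                 state = 1
--                 start = i
--                 i += 2
--             else:
--                 state = 2
--                 start = i
--                 depth = 1 if c == '{' else 0
--                 i += 1
--         elif state == 1:
--             if c == '*' and i + 1 < n and css[i + 1] == '/':
--                 blocks.append(css[start:i + 2])
--                 state = 0
--                 i += 2
--             else:
--                 i += 1
--         else:
--             if c == '{':
--                 depth += 1
--             elif c == '}' and depth > 0:
--                 depth -= 1
--                 if depth == 0:
--                     blocks.append(css[start:i + 1])
--                     state = 0
--             i += 1
--     if state == 1 or (state == 2 and depth > 0):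
--         blocks.append(css[start:])
--     return blocks
-- ===== Notes on version B (the rewrite author's own statement) =====
-- stated objective: alternative
-- what changed: Replaces A's multi-scan parser (whitespace-skip loop, a find call for the comment terminator, a find call for the opening brace plus a separate brace-depth rescan, restarting from the top for each block) with a single left-to-right character pass driven by an explicit state machine (idle / in-comment / in-rule) that keeps a block-start index and a brace-depth counter.
import Mathlib
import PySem

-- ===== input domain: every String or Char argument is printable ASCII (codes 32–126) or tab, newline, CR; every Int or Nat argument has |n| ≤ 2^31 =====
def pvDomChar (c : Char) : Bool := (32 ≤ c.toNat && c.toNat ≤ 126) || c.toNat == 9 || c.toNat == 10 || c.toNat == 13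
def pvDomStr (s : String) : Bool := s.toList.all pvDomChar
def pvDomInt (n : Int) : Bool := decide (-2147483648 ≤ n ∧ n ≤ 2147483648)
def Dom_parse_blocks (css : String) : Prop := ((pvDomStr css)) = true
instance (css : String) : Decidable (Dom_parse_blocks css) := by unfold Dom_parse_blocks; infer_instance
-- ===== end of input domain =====

-- B replaces A's find()-based multi-scan parser by a single character-at-a-time
-- state machine over the string (objective: alternative, same O(n) cost).

-- ===== PORT A =====
-- small decrease lemmas cited by the ports' decreasing_by (kept above the ports for that reason)
theorem pvDec1 {n i : Nat} (h : i < n) : n - (i + 1) < n - i := by omega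
theorem pvDec2 {n i : Nat} (h : i < n) : n - (i + 2) < n - i := by omega
theorem pvDecEnd {n i : Nat} (h : i < n) : n - n < n - i := by omega

-- ' \t\n\r' membership test shared by both Pythons
def pvIsWS (c : Char) : Bool := c == ' ' || c == '\t' || c == '\n' || c == '\r'

-- inner loop `while i < n and css[i] in ' \t\n\r': i += 1`
def pvSkipWS (l : List Char) (i : Nat) : Nat :=
  if h : i < l.length then
    if pvIsWS l[i] then pvSkipWS l (i + 1) else i
  else i
termination_by l.length - i
decreasing_by exact pvDec1 h

-- inner loop `while j < n: if css[j]=='{': depth+=1 elif css[j]=='}': depth-=1; if depth==0: break; j+=1`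
def pvDepthScan (l : List Char) (j : Nat) (depth : Int) : Nat :=
  if h : j < l.length then
    if l[j] = '{' then pvDepthScan l (j + 1) (depth + 1)
    else if l[j] = '}' then
      if depth - 1 = 0 then j else pvDepthScan l (j + 1) (depth - 1)
    else pvDepthScan l (j + 1) depth
  else j
termination_by l.length - j
decreasing_by all_goals exact pvDec1 h

-- lemmas the outer loop's termination proof cites
theorem pvSkipWS_ge (l : List Char) (i : Nat) : i ≤ pvSkipWS l i := by
  fun_induction pvSkipWS l i with
  | case1 i h hws ih => omega
  | case2 i h hws => omega
  | case3 i h => omega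

theorem pvDepthScan_ge (l : List Char) (j : Nat) (d : Int) : j ≤ pvDepthScan l j d := by
  fun_induction pvDepthScan l j d <;> omega

theorem pvSliceNat (l : List Char) (a b : Nat) :
    PySem.List.slice l (some (a : Int)) (some (b : Int)) = (l.drop a).take (b - a) := by
  rw [PySem.List.slice_toNat l (by positivity) (by positivity)]
  simp

theorem pvSliceTwoIff (l : List Char) (i : Nat) (a b : Char) :
    PySem.List.slice l (some (i : Int)) (some ((i + 2 : Nat) : Int)) = [a, b] ↔
      (l[i]? = some a ∧ l[i + 1]? = some b) := by
  rw [pvSliceNat]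
  have h0 : l[i]? = (l.drop i)[0]? := by simpa using (List.getElem?_drop (l := l) (i := i) (j := 0)).symm
  have h1 : l[i + 1]? = (l.drop i)[1]? := by
    simpa using (List.getElem?_drop (l := l) (i := i) (j := 1)).symm
  rw [h0, h1]
  have : i + 2 - i = 2 := by omega
  rw [this]
  rcases l.drop i with _ | ⟨x, _ | ⟨y, t⟩⟩ <;> simp [List.take]

theorem pvFindFound (l sub : List Char) (k : Nat) (hk : k ≤ l.length)
    (hne : PySem.Chars.findFrom l sub (k : Int) none ≠ -1) :
    k ≤ (PySem.Chars.findFrom l sub (k : Int) none).toNat ∧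
      sub <+: l.drop (PySem.Chars.findFrom l sub (k : Int) none).toNat := by
  have h := PySem.Chars.findFrom_natCast_spec l sub k hk hne
  exact ⟨by omega, h.2.1⟩

theorem pvLtOfGet (l : List Char) (j : Nat) (c : Char) (h : l[j]? = some c) : j < l.length := by
  by_contra hge
  rw [List.getElem?_eq_none (by omega)] at h
  cases h

theorem pvDecFindC (l : List Char) (i : Nat) (hn : i < l.length)
    (h2 : PySem.List.slice l (some ((pvSkipWS l i : Nat) : Int))
      (some ((pvSkipWS l i + 2 : Nat) : Int)) = ['/', '*'])
    (hf : ¬ PySem.Chars.findFrom l ['*', '/'] ((pvSkipWS l i + 2 : Nat) : Int) none = -1) :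
    l.length - ((PySem.Chars.findFrom l ['*', '/'] ((pvSkipWS l i + 2 : Nat) : Int) none).toNat + 2) <
      l.length - i := by
  have hg := pvSkipWS_ge l i
  have hc2 := ((pvSliceTwoIff l (pvSkipWS l i) '/' '*').mp h2).2
  have hlen : pvSkipWS l i + 1 < l.length := pvLtOfGet l _ '*' hc2
  have hfd := pvFindFound l ['*', '/'] (pvSkipWS l i + 2) (by omega) hf
  omega

theorem pvDecBrace (l : List Char) (i : Nat) (hn : i < l.length) (h1 : pvSkipWS l i < l.length)
    (hb : ¬ PySem.Chars.findFrom l ['{'] ((pvSkipWS l i : Nat) : Int) none = -1) :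
    l.length - (pvDepthScan l (PySem.Chars.findFrom l ['{'] ((pvSkipWS l i : Nat) : Int) none).toNat 0 + 1) <
      l.length - i := by
  have hg := pvSkipWS_ge l i
  have hfd := pvFindFound l ['{'] (pvSkipWS l i) (le_of_lt h1) hb
  have hds := pvDepthScan_ge l (PySem.Chars.findFrom l ['{'] ((pvSkipWS l i : Nat) : Int) none).toNat 0
  omega

-- outer `while i < n` loop of A; the two find() calls and the two inner loops above
def pvOuterA (l : List Char) (i : Nat) : List (List Char) :=
  if hn : i < l.length then
    if h1 : pvSkipWS l i < l.length then
      if h2 : PySem.List.slice l (some ((pvSkipWS l i : Nat) : Int))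
          (some ((pvSkipWS l i + 2 : Nat) : Int)) = ['/', '*'] then
        -- css[i:i+2] == '/*' : end = css.find('*/', i+2)
        if hf : PySem.Chars.findFrom l ['*', '/'] ((pvSkipWS l i + 2 : Nat) : Int) none = -1 then
          PySem.List.slice l (some ((pvSkipWS l i : Nat) : Int)) (some ((l.length : Nat) : Int)) ::
            pvOuterA l l.length
        else
          PySem.List.slice l (some ((pvSkipWS l i : Nat) : Int))
              (some (((PySem.Chars.findFrom l ['*', '/'] ((pvSkipWS l i + 2 : Nat) : Int) none).toNat + 2 : Nat) : Int)) ::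
            pvOuterA l ((PySem.Chars.findFrom l ['*', '/'] ((pvSkipWS l i + 2 : Nat) : Int) none).toNat + 2)
      else
        -- brace = css.find('{', i)
        if hb : PySem.Chars.findFrom l ['{'] ((pvSkipWS l i : Nat) : Int) none = -1 then []
        else
          PySem.List.slice l (some ((pvSkipWS l i : Nat) : Int))
              (some ((pvDepthScan l (PySem.Chars.findFrom l ['{'] ((pvSkipWS l i : Nat) : Int) none).toNat 0 + 1 : Nat) : Int)) ::
            pvOuterA l (pvDepthScan l (PySem.Chars.findFrom l ['{'] ((pvSkipWS l i : Nat) : Int) none).toNat 0 + 1)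
    else []
  else []
termination_by l.length - i
decreasing_by
  · exact pvDecEnd hn
  · exact pvDecFindC l i hn h2 hf
  · exact pvDecBrace l i hn h1 hb

def parse_blocks (css : String) : List String :=
  (pvOuterA css.toList 0).map String.ofList

-- ===== PORT B =====
-- single while-loop of Source B: state 0 = idle, 1 = inside comment, 2 = inside rule text;
-- the guarded `css[i+1]` lookups are ported as `l[i+1]? = some _` (bounds check + index in one)
def pvLoopB (l : List Char) (i : Nat) (state : Nat) (start : Nat) (depth : Int)
    (blocks : List (List Char)) : List (List Char) :=
  if h : i < l.length then
    if state = 0 then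
      if pvIsWS l[i] then pvLoopB l (i + 1) 0 start depth blocks
      else if l[i] = '/' ∧ l[i + 1]? = some '*' then pvLoopB l (i + 2) 1 i depth blocks
      else pvLoopB l (i + 1) 2 i (if l[i] = '{' then 1 else 0) blocks
    else if state = 1 then
      if l[i] = '*' ∧ l[i + 1]? = some '/' then
        pvLoopB l (i + 2) 0 start depth
          (blocks ++ [PySem.List.slice l (some (start : Int)) (some ((i + 2 : Nat) : Int))])
      else pvLoopB l (i + 1) 1 start depth blocks
    else
      if l[i] = '{' then pvLoopB l (i + 1) 2 start (depth + 1) blocks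
      else if l[i] = '}' ∧ depth > 0 then
        if depth - 1 = 0 then
          pvLoopB l (i + 1) 0 start (depth - 1)
            (blocks ++ [PySem.List.slice l (some (start : Int)) (some ((i + 1 : Nat) : Int))])
        else pvLoopB l (i + 1) 2 start (depth - 1) blocks
      else pvLoopB l (i + 1) 2 start depth blocks
  else
    if state = 1 ∨ (state = 2 ∧ depth > 0) then
      blocks ++ [PySem.List.slice l (some (start : Int)) none]
    else blocks
termination_by l.length - i
decreasing_by all_goals first | exact pvDec1 h | exact pvDec2 h

def parse_blocks_alt (css : String) : List String :=
  (pvLoopB css.toList 0 0 0 0 []).map String.ofList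

-- ===== PRECONDITION & SPEC =====
def Spec_parse_blocks (css : String) (out : List String) : Prop := out = parse_blocks_alt css
instance (css : String) (out : List String) : Decidable (Spec_parse_blocks css out) := by
  unfold Spec_parse_blocks; infer_instance

-- ===== CLAIM (what is proved, stated in full; the proofs are below) =====
def Claim_equal_parse_blocks : Prop :=
  ∀ (css : String), Dom_parse_blocks css → Spec_parse_blocks css (parse_blocks css)

-- ===== LEMMAS AND PROOFS =====

theorem pvSkipWS_step (l : List Char) (i : Nat) (hn : i < l.length) (hws : pvIsWS l[i] = true) :
    pvSkipWS l i = pvSkipWS l (i + 1) := by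
  rw [pvSkipWS.eq_def]; simp [hn, hws]

theorem pvSkipWS_stop (l : List Char) (i : Nat) (hn : i < l.length) (hws : ¬ pvIsWS l[i] = true) :
    pvSkipWS l i = i := by
  rw [pvSkipWS.eq_def]; simp [hn, hws]

theorem pvSkipWS_of_ge (l : List Char) (i : Nat) (h : ¬ i < l.length) : pvSkipWS l i = i := by
  rw [pvSkipWS.eq_def]; simp [h]

theorem pvOuterA_nil (l : List Char) (i : Nat) (h : ¬ i < l.length) : pvOuterA l i = [] := by
  rw [pvOuterA.eq_def]; simp [h]

theorem pvOuterA_ws (l : List Char) (i : Nat) (hn : i < l.length) (hws : pvIsWS l[i] = true) :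
    pvOuterA l i = pvOuterA l (i + 1) := by
  have hsk := pvSkipWS_step l i hn hws
  by_cases hn1 : i + 1 < l.length
  · rw [pvOuterA.eq_def, pvOuterA.eq_def (i := i + 1)]
    simp only [dif_pos hn, dif_pos hn1, hsk]
  · have : pvSkipWS l (i + 1) = i + 1 := pvSkipWS_of_ge l (i + 1) hn1
    rw [pvOuterA.eq_def, pvOuterA.eq_def (i := i + 1)]
    simp only [dif_pos hn, dif_neg hn1, hsk, this, dif_neg hn1]

theorem pvSliceAll (l : List Char) (a b : Nat) (h : l.length ≤ b) :
    PySem.List.slice l (some (a : Int)) (some (b : Int)) =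
      PySem.List.slice l (some (a : Int)) none := by
  rw [pvSliceNat, PySem.List.slice_from l (by positivity)]
  simp only [Int.toNat_natCast]
  exact List.take_of_length_le (by simp; omega)

theorem pvPrefixOne (l : List Char) (j : Nat) (c : Char) :
    [c] <+: l.drop j ↔ l[j]? = some c := by
  have h0 : l[j]? = (l.drop j)[0]? := by
    simpa using (List.getElem?_drop (l := l) (i := j) (j := 0)).symm
  rw [h0]
  rcases l.drop j with _ | ⟨x, t⟩ <;> simp [List.cons_prefix_cons, eq_comm]

theorem pvPrefixTwo (l : List Char) (j : Nat) (a b : Char) :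
    [a, b] <+: l.drop j ↔ (l[j]? = some a ∧ l[j + 1]? = some b) := by
  have h0 : l[j]? = (l.drop j)[0]? := by
    simpa using (List.getElem?_drop (l := l) (i := j) (j := 0)).symm
  have h1 : l[j + 1]? = (l.drop j)[1]? := by
    simpa using (List.getElem?_drop (l := l) (i := j) (j := 1)).symm
  rw [h0, h1]
  rcases l.drop j with _ | ⟨x, _ | ⟨y, t⟩⟩
  · simp
  · simp [List.cons_prefix_cons]
  · simp only [List.cons_prefix_cons, List.nil_prefix, and_true, List.getElem?_cons_zero,
      List.getElem?_cons_succ, Option.some.injEq]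
    constructor
    · rintro ⟨h1, h2⟩; exact ⟨h1.symm, h2.symm⟩
    · rintro ⟨h1, h2⟩; exact ⟨h1.symm, h2.symm⟩

theorem pvFindZero (r sub : List Char) (h : sub <+: r) : PySem.Chars.find r sub = 0 := by
  have h0 : 0 ≤ PySem.Chars.find r sub := (PySem.Chars.find_nonneg_iff r sub).mpr h.isInfix
  obtain ⟨hp, hmin⟩ := PySem.Chars.find_spec h0
  have ht : (PySem.Chars.find r sub).toNat = 0 := by
    by_contra hne
    exact hmin 0 (Nat.pos_of_ne_zero hne) (by rw [List.drop_zero]; exact h)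
  omega

theorem pvFindEqOf (r sub : List Char) (k : Nat) (h1 : sub <+: r.drop k)
    (h2 : ∀ i < k, ¬ sub <+: r.drop i) : PySem.Chars.find r sub = (k : Int) := by
  have hinf : sub <:+: r := h1.isInfix.trans (List.drop_suffix k r).isInfix
  have h0 : 0 ≤ PySem.Chars.find r sub := (PySem.Chars.find_nonneg_iff r sub).mpr hinf
  obtain ⟨hp, hmin⟩ := PySem.Chars.find_spec h0
  have ht : (PySem.Chars.find r sub).toNat = k := by
    rcases Nat.lt_trichotomy (PySem.Chars.find r sub).toNat k with h | h | h
    · exact absurd hp (h2 _ h)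
    · exact h
    · exact absurd h1 (hmin k h)
  omega

theorem pvFindHere (l sub : List Char) (k : Nat) (hk : k ≤ l.length) (h : sub <+: l.drop k) :
    PySem.Chars.findFrom l sub (k : Int) none = (k : Int) := by
  rw [PySem.Chars.findFrom_natCast l sub k hk, pvFindZero _ _ h]
  norm_num

theorem pvFindSucc (l sub : List Char) (k : Nat) (hk : k < l.length) (h : ¬ sub <+: l.drop k) :
    PySem.Chars.findFrom l sub (k : Int) none = PySem.Chars.findFrom l sub ((k + 1 : Nat) : Int) none := by
  rw [PySem.Chars.findFrom_natCast l sub k (le_of_lt hk),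
    PySem.Chars.findFrom_natCast l sub (k + 1) hk]
  have hd : l.drop k = l[k] :: l.drop (k + 1) := List.drop_eq_getElem_cons hk
  by_cases hm : PySem.Chars.find (l.drop (k + 1)) sub = -1
  · have hni : ¬ sub <:+: l.drop (k + 1) := (PySem.Chars.find_eq_neg_one_iff _ _).mp hm
    have : PySem.Chars.find (l.drop k) sub = -1 := by
      apply (PySem.Chars.find_eq_neg_one_iff _ _).mpr
      rw [hd, List.infix_cons_iff]
      rintro (hc | hc)
      · exact h (hd ▸ hc)
      · exact hni hc
    simp [this, hm]
  · have h0 : 0 ≤ PySem.Chars.find (l.drop (k + 1)) sub := by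
      have := PySem.Chars.neg_one_le_find (l.drop (k + 1)) sub; omega
    obtain ⟨hp, hmin⟩ := PySem.Chars.find_spec h0
    have heq : PySem.Chars.find (l.drop k) sub =
        (((PySem.Chars.find (l.drop (k + 1)) sub).toNat + 1 : Nat) : Int) := by
      apply pvFindEqOf
      · rw [hd, List.drop_succ_cons]; exact hp
      · intro i hi
        rcases i with _ | i'
        · simpa using h
        · rw [hd, List.drop_succ_cons]
          exact hmin i' (by omega)
    rw [heq]
    have hne1 : ¬ (((PySem.Chars.find (l.drop (k + 1)) sub).toNat + 1 : Nat) : Int) = -1 := by omega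
    rw [if_neg hne1, if_neg hm]
    have := Int.toNat_of_nonneg h0
    push_cast
    omega

theorem pvFindEnd (l sub : List Char) (h : sub ≠ []) :
    PySem.Chars.findFrom l sub ((l.length : Nat) : Int) none = -1 := by
  rw [PySem.Chars.findFrom_natCast l sub l.length (le_refl _), List.drop_length]
  have : PySem.Chars.find [] sub = -1 :=
    (PySem.Chars.find_eq_neg_one_iff _ _).mpr (by simp [List.infix_nil, h])
  simp [this]

-- canonical results of B's three non-idle scanning modes, phrased with A's primitives
def pvCommentRes (l : List Char) (i start : Nat) (blocks : List (List Char)) : List (List Char) :=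
  if PySem.Chars.findFrom l ['*', '/'] (i : Int) none = -1 then
    blocks ++ [PySem.List.slice l (some (start : Int)) none]
  else
    blocks ++ [PySem.List.slice l (some (start : Int))
        (some (((PySem.Chars.findFrom l ['*', '/'] (i : Int) none).toNat + 2 : Nat) : Int))] ++
      pvOuterA l ((PySem.Chars.findFrom l ['*', '/'] (i : Int) none).toNat + 2)

def pvRunRes (l : List Char) (j start : Nat) (d : Int) (blocks : List (List Char)) : List (List Char) :=
  if pvDepthScan l j d < l.length then
    blocks ++ [PySem.List.slice l (some (start : Int)) (some ((pvDepthScan l j d + 1 : Nat) : Int))] ++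
      pvOuterA l (pvDepthScan l j d + 1)
  else blocks ++ [PySem.List.slice l (some (start : Int)) none]

def pvSeekRes (l : List Char) (j start : Nat) (blocks : List (List Char)) : List (List Char) :=
  if PySem.Chars.findFrom l ['{'] (j : Int) none = -1 then blocks
  else pvRunRes l ((PySem.Chars.findFrom l ['{'] (j : Int) none).toNat + 1) start 1 blocks

theorem pvRunEq (l : List Char) (blocks : List (List Char)) (i1 b : Nat) (hb : b < l.length)
    (hc : l[b] = '{') :
    blocks ++ (PySem.List.slice l (some (i1 : Int)) (some ((pvDepthScan l b 0 + 1 : Nat) : Int)) ::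
        pvOuterA l (pvDepthScan l b 0 + 1)) = pvRunRes l (b + 1) i1 1 blocks := by
  have hstep : pvDepthScan l b 0 = pvDepthScan l (b + 1) 1 := by
    rw [pvDepthScan.eq_def]; simp [hb, hc]
  rw [pvRunRes, hstep]
  by_cases he : pvDepthScan l (b + 1) 1 < l.length
  · simp [he]
  · rw [if_neg he]
    rw [pvOuterA_nil l _ (by omega), pvSliceAll l i1 _ (by omega)]

theorem pvMain (l : List Char) : ∀ (k i : Nat), l.length - i < k →
    (∀ start d blocks, pvLoopB l i 0 start d blocks = blocks ++ pvOuterA l i) ∧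
    (i ≤ l.length → ∀ start d blocks, pvLoopB l i 1 start d blocks = pvCommentRes l i start blocks) ∧
    (i ≤ l.length → ∀ start blocks, pvLoopB l i 2 start 0 blocks = pvSeekRes l i start blocks) ∧
    (i ≤ l.length → ∀ start d blocks, 1 ≤ d →
      pvLoopB l i 2 start d blocks = pvRunRes l i start d blocks) := by
  intro k
  induction k with
  | zero => intro i h; omega
  | succ k ih =>
    intro i hk
    refine ⟨?_, ?_, ?_, ?_⟩
    · -- state 0
      intro start d blocks
      by_cases hn : i < l.length
      · rw [pvLoopB.eq_def]
        simp only [dif_pos hn, reduceIte]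
        by_cases hws : pvIsWS l[i] = true
        · rw [if_pos hws, (ih (i + 1) (by omega)).1, pvOuterA_ws l i hn hws]
        · rw [if_neg hws]
          have hsk : pvSkipWS l i = i := pvSkipWS_stop l i hn hws
          rw [pvOuterA.eq_def]
          simp only [dif_pos hn, hsk, dif_pos hn]
          by_cases hc : l[i] = '/' ∧ l[i + 1]? = some '*'
          · rw [if_pos hc]
            have hgi : l[i]? = some '/' := by rw [List.getElem?_eq_getElem hn, hc.1]
            have h2 : PySem.List.slice l (some ((i : Nat) : Int)) (some ((i + 2 : Nat) : Int)) = ['/', '*'] :=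
              (pvSliceTwoIff l i '/' '*').mpr ⟨hgi, hc.2⟩
            have hn1 : i + 1 < l.length := pvLtOfGet l _ '*' hc.2
            rw [dif_pos h2]
            rw [(ih (i + 2) (by omega)).2.1 (by omega) i d blocks]
            rw [pvCommentRes]
            by_cases hf : PySem.Chars.findFrom l ['*', '/'] ((i + 2 : Nat) : Int) none = -1
            · rw [if_pos hf, dif_pos hf]
              rw [pvOuterA_nil l l.length (by omega), pvSliceAll l i l.length (le_refl _)]
            · rw [if_neg hf, dif_neg hf]
              simp
          · rw [if_neg hc]
            have hgi : l[i]? = some l[i] := List.getElem?_eq_getElem hn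
            have h2 : ¬ PySem.List.slice l (some ((i : Nat) : Int)) (some ((i + 2 : Nat) : Int)) = ['/', '*'] := by
              intro hcontra
              obtain ⟨ha, hb⟩ := (pvSliceTwoIff l i '/' '*').mp hcontra
              rw [hgi] at ha
              exact hc ⟨Option.some_injective _ ha, hb⟩
            rw [dif_neg h2]
            by_cases hbr : l[i] = '{'
            · rw [if_pos hbr]
              rw [(ih (i + 1) (by omega)).2.2.2 (by omega) i 1 blocks (by omega)]
              have hpre : ['{'] <+: l.drop i := (pvPrefixOne l i '{').mpr (by rw [hgi, hbr])
              have hfh : PySem.Chars.findFrom l ['{'] ((i : Nat) : Int) none = (i : Int) :=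
                pvFindHere l ['{'] i (by omega) hpre
              have hne : ¬ PySem.Chars.findFrom l ['{'] ((i : Nat) : Int) none = -1 := by
                rw [hfh]; omega
              rw [dif_neg hne]
              have htn : (PySem.Chars.findFrom l ['{'] ((i : Nat) : Int) none).toNat = i := by
                rw [hfh]; simp
              rw [htn]
              exact (pvRunEq l blocks i i hn hbr).symm
            · rw [if_neg hbr]
              rw [(ih (i + 1) (by omega)).2.2.1 (by omega) i blocks]
              have hnpre : ¬ ['{'] <+: l.drop i := by
                rw [pvPrefixOne, hgi]
                intro hcontra; exact hbr (Option.some_injective _ (hgi ▸ hcontra))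
              have hstep := pvFindSucc l ['{'] i hn hnpre
              rw [pvSeekRes, ← hstep]
              by_cases hb : PySem.Chars.findFrom l ['{'] ((i : Nat) : Int) none = -1
              · rw [if_pos hb, dif_pos hb]; simp
              · rw [if_neg hb, dif_neg hb]
                obtain ⟨hge, hpre⟩ := pvFindFound l ['{'] i (by omega) hb
                have hgb : l[(PySem.Chars.findFrom l ['{'] ((i : Nat) : Int) none).toNat]? = some '{' :=
                  (pvPrefixOne l _ '{').mp hpre
                have hblt : (PySem.Chars.findFrom l ['{'] ((i : Nat) : Int) none).toNat < l.length :=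
                  pvLtOfGet l _ '{' hgb
                have hbv : l[(PySem.Chars.findFrom l ['{'] ((i : Nat) : Int) none).toNat] = '{' := by
                  have := List.getElem?_eq_getElem hblt
                  rw [this] at hgb; exact Option.some_injective _ hgb
                exact (pvRunEq l blocks i _ hblt hbv).symm
      · rw [pvLoopB.eq_def]
        simp only [dif_neg hn]
        rw [pvOuterA_nil l i hn]
        simp
    · -- state 1
      intro hi start d blocks
      by_cases hn : i < l.length
      · rw [pvLoopB.eq_def]
        simp only [dif_pos hn]
        simp only [show ((1 : Nat) = 0) = False from by simp, show ((1 : Nat) = 1) = True from by simp,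
          if_false, if_true]
        by_cases hc : l[i] = '*' ∧ l[i + 1]? = some '/'
        · rw [if_pos hc]
          rw [(ih (i + 2) (by omega)).1]
          have hgi : l[i]? = some '*' := by rw [List.getElem?_eq_getElem hn, hc.1]
          have hpre : ['*', '/'] <+: l.drop i := (pvPrefixTwo l i '*' '/').mpr ⟨hgi, hc.2⟩
          have hfh := pvFindHere l ['*', '/'] i (by omega) hpre
          rw [pvCommentRes, hfh]
          have : ¬ (i : Int) = -1 := by omega
          rw [if_neg this]
          simp
        · rw [if_neg hc]
          rw [(ih (i + 1) (by omega)).2.1 (by omega) start d blocks]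
          have hgi : l[i]? = some l[i] := List.getElem?_eq_getElem hn
          have hnpre : ¬ ['*', '/'] <+: l.drop i := by
            rw [pvPrefixTwo, hgi]
            intro hcontra
            exact hc ⟨Option.some_injective _ (hgi ▸ hcontra.1), hcontra.2⟩
          rw [pvCommentRes, pvCommentRes, pvFindSucc l ['*', '/'] i hn hnpre]
      · have hieq : i = l.length := by omega
        rw [pvLoopB.eq_def]
        simp only [dif_neg hn]
        rw [pvCommentRes, hieq, pvFindEnd l ['*', '/'] (by simp)]
        simp
    · -- state 2, depth 0 (seeking the first '{')
      intro hi start blocks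
      by_cases hn : i < l.length
      · rw [pvLoopB.eq_def]
        simp only [dif_pos hn]
        simp only [show ((2 : Nat) = 0) = False from by simp, show ((2 : Nat) = 1) = False from by simp,
          if_false]
        have hgi : l[i]? = some l[i] := List.getElem?_eq_getElem hn
        by_cases hbr : l[i] = '{'
        · rw [if_pos hbr]
          have h01 : (0 : Int) + 1 = 1 := by norm_num
          rw [h01, (ih (i + 1) (by omega)).2.2.2 (by omega) start 1 blocks (by omega)]
          have hpre : ['{'] <+: l.drop i := (pvPrefixOne l i '{').mpr (by rw [hgi, hbr])
          have hfh := pvFindHere l ['{'] i (by omega) hpre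
          rw [pvSeekRes, hfh]
          have : ¬ (i : Int) = -1 := by omega
          rw [if_neg this]
          simp
        · rw [if_neg hbr]
          have hfalse : ¬ (l[i] = '}' ∧ (0 : Int) > 0) := by intro h; exact absurd h.2 (by norm_num)
          rw [if_neg hfalse]
          rw [(ih (i + 1) (by omega)).2.2.1 (by omega) start blocks]
          have hnpre : ¬ ['{'] <+: l.drop i := by
            rw [pvPrefixOne, hgi]
            intro hcontra; exact hbr (Option.some_injective _ (hgi ▸ hcontra))
          rw [pvSeekRes, pvSeekRes, pvFindSucc l ['{'] i hn hnpre]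
      · have hieq : i = l.length := by omega
        rw [pvLoopB.eq_def]
        simp only [dif_neg hn]
        rw [pvSeekRes, hieq, pvFindEnd l ['{'] (by simp)]
        simp
    · -- state 2, depth ≥ 1 (inside braces)
      intro hi start d blocks hd
      by_cases hn : i < l.length
      · rw [pvLoopB.eq_def]
        simp only [dif_pos hn]
        simp only [show ((2 : Nat) = 0) = False from by simp, show ((2 : Nat) = 1) = False from by simp,
          if_false]
        by_cases hbr : l[i] = '{'
        · rw [if_pos hbr]
          rw [(ih (i + 1) (by omega)).2.2.2 (by omega) start (d + 1) blocks (by omega)]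
          have hstep : pvDepthScan l i d = pvDepthScan l (i + 1) (d + 1) := by
            rw [pvDepthScan.eq_def]; simp [hn, hbr]
          rw [pvRunRes, pvRunRes, hstep]
        · rw [if_neg hbr]
          by_cases hcl : l[i] = '}'
          · have hcond : l[i] = '}' ∧ d > 0 := ⟨hcl, by omega⟩
            rw [if_pos hcond]
            by_cases hd1 : d - 1 = 0
            · rw [if_pos hd1]
              rw [(ih (i + 1) (by omega)).1]
              have hstep : pvDepthScan l i d = i := by
                rw [pvDepthScan.eq_def]; simp [hn, hbr, hcl, hd1]
              rw [pvRunRes, hstep, if_pos hn]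
            · rw [if_neg hd1]
              rw [(ih (i + 1) (by omega)).2.2.2 (by omega) start (d - 1) blocks (by omega)]
              have hstep : pvDepthScan l i d = pvDepthScan l (i + 1) (d - 1) := by
                rw [pvDepthScan.eq_def]; simp [hn, hbr, hcl, hd1]
              rw [pvRunRes, pvRunRes, hstep]
          · have hcond : ¬ (l[i] = '}' ∧ d > 0) := by intro h; exact hcl h.1
            rw [if_neg hcond]
            rw [(ih (i + 1) (by omega)).2.2.2 (by omega) start d blocks hd]
            have hstep : pvDepthScan l i d = pvDepthScan l (i + 1) d := by
              rw [pvDepthScan.eq_def]; simp [hn, hbr, hcl]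
            rw [pvRunRes, pvRunRes, hstep]
      · have hieq : i = l.length := by omega
        rw [pvLoopB.eq_def]
        simp only [dif_neg hn]
        have hcond : (1 : Nat) = 1 ∨ ((2 : Nat) = 2 ∧ d > 0) := Or.inr ⟨rfl, by omega⟩
        rw [pvRunRes]
        have hscan : pvDepthScan l i d = i := by rw [pvDepthScan.eq_def]; simp [hn]
        rw [hscan, hieq]
        simp [hd]
        omega
-- ===== VERDICT (by name: the statement is the Claim_ definition above) =====
theorem parse_blocks_spec : Claim_equal_parse_blocks := by
  intro css _
  unfold Spec_parse_blocks parse_blocks parse_blocks_alt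
  have h := (pvMain css.toList (css.toList.length + 1) 0 (by omega)).1 0 0 []
  rw [h]
  simp
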